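-- pv_equiv track=rewrite | github.com/mariusz-tang/Advent-of-Code-2023 | Day 14/solution.py | left_tilted
-- ===== SOURCE A (Python) =====
-- def left_tilted(grid):
--     tilted_grid = []
--     for row in grid:
--         last_pos = -1
--         round_rocks = 0
--         new_row = ""
--         for pos, char in enumerate(row):
--             if char == "O":
--                 round_rocks += 1
--             elif char == "#":
--                 new_row += "O" * round_rocks
--                 new_row += "." * (pos - 1 - last_pos - round_rocks)
--                 new_row += "#"
--                 last_pos = pos
--                 round_rocks = 0
--         new_row += "O" * round_rocks
--         new_row += "." * (len(row) - 1 - last_pos - round_rocks)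
--         tilted_grid.append(new_row)
--     return tilted_grid
-- ===== SOURCE B (Python) =====
-- def left_tilted(grid):
--     result = []
--     for row in grid:
--         segments = row.split("#")
--         packed = []
--         for seg in segments:
--             c = seg.count("O")
--             packed.append("O" * c + "." * (len(seg) - c))
--         result.append("#".join(packed))
--     return result
-- ===== Notes on version B (the rewrite author's own statement) =====
-- stated objective: simpler
-- what changed: Replaces A's running last_pos/round_rocks index arithmetic over enumerate(row) with splitting each row on '#', packing each segment as 'O'*count + '.'*(len-count), and joining with '#'.
import Mathlib
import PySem

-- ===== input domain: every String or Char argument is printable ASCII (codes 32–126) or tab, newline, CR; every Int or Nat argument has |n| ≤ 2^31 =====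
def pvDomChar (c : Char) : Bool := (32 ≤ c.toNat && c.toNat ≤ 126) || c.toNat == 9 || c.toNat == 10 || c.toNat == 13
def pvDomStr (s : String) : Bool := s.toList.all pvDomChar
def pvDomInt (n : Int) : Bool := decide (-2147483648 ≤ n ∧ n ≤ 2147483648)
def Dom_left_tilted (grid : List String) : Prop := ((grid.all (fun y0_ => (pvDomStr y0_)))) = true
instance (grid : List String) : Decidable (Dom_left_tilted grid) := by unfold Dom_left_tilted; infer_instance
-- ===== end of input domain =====

-- B replaces A's running last_pos/round_rocks index arithmetic with a split-on-'#',
-- count-and-pack per segment, and a '#'-join (objective: simpler decomposition).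

-- ===== PORT A =====
-- literal transliteration of A: per row, fold over enumerate(row) with state
-- (last_pos, round_rocks, new_row); '*' on a negative count gives "" (Int.toNat clamps identically)
def left_tilted (grid : List String) : List String :=
  grid.foldl (fun tilted_grid row =>
    let st := (PySem.List.enumerate row.toList).foldl
      (fun (st : Int × Int × List Char) pc =>
        if pc.2 = 'O' then (st.1, st.2.1 + 1, st.2.2)
        else if pc.2 = '#' then
          (pc.1, 0, st.2.2 ++ List.replicate st.2.1.toNat 'O'
            ++ List.replicate (pc.1 - 1 - st.1 - st.2.1).toNat '.' ++ ['#'])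
        else st)
      (-1, 0, ([] : List Char))
    tilted_grid ++ [String.ofList (st.2.2 ++ List.replicate st.2.1.toNat 'O'
      ++ List.replicate (PySem.Str.len row - 1 - st.1 - st.2.1).toNat '.')]) []

-- ===== PORT B =====
-- literal transliteration of B: split each row on '#', pack each segment as
-- 'O'*count + '.'*(len-count), join the packed segments with '#'
def left_tilted_alt (grid : List String) : List String :=
  grid.foldl (fun result row =>
    let segments := PySem.Chars.splitOn row.toList ['#']
    let packed := segments.map (fun seg =>
      let c := PySem.Chars.count seg ['O']
      List.replicate c 'O' ++ List.replicate ((PySem.List.len seg) - (c : Int)).toNat '.')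
    result ++ [String.ofList (PySem.Chars.join ['#'] packed)]) []

-- ===== PRECONDITION & SPEC =====
def Spec_left_tilted (grid : List String) (out : List String) : Prop := out = left_tilted_alt grid
instance (grid : List String) (out : List String) : Decidable (Spec_left_tilted grid out) := by unfold Spec_left_tilted; infer_instance

-- ===== CLAIM (what is proved, stated in full; the proofs are below) =====
def Claim_equal_left_tilted : Prop := ∀ (grid : List String), Dom_left_tilted grid → Spec_left_tilted grid (left_tilted grid)

-- ===== LEMMAS AND PROOFS =====

-- canonical per-row semantics: r pending round rocks, d pending dots since the last '#'
def pvGo (cs : List Char) (r d : Nat) : List Char :=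
  match cs with
  | [] => List.replicate r 'O' ++ List.replicate d '.'
  | c :: rest =>
    if c = 'O' then pvGo rest (r + 1) d
    else if c = '#' then
      List.replicate r 'O' ++ List.replicate d '.' ++ '#' :: pvGo rest 0 0
    else pvGo rest r (d + 1)

-- structural version of split-on-'#'
def pvSplit1 (cs : List Char) : List (List Char) :=
  match cs with
  | [] => [[]]
  | c :: rest =>
    if c = '#' then [] :: pvSplit1 rest
    else
      match pvSplit1 rest with
      | [] => [[c]]
      | s :: ss => (c :: s) :: ss

theorem pvSplit1_ne_nil (cs : List Char) : pvSplit1 cs ≠ [] := by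
  cases cs with
  | nil => simp [pvSplit1]
  | cons c rest =>
    simp only [pvSplit1]
    split_ifs
    · simp
    · cases pvSplit1 rest <;> simp

theorem splitOn_go_eq (fuel : Nat) : ∀ (l cur : List Char) (acc : List (List Char)),
    l.length ≤ fuel →
    PySem.Chars.splitOn.go ['#'] fuel l cur acc =
      acc.reverse ++ (cur.reverse ++ (pvSplit1 l).headI) :: (pvSplit1 l).tail := by
  induction fuel with
  | zero =>
    intro l cur acc h
    interval_cases h' : l.length
    have : l = [] := List.length_eq_zero_iff.mp h'
    subst this
    simp [PySem.Chars.splitOn.go, pvSplit1]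
  | succ fuel ih =>
    intro l cur acc h
    cases l with
    | nil => simp [PySem.Chars.splitOn.go, pvSplit1]
    | cons c rest =>
      by_cases hc : c = '#'
      · subst hc
        have hpre : List.isPrefixOf ['#'] ('#' :: rest) = true := by simp [List.isPrefixOf]
        simp only [PySem.Chars.splitOn.go, hpre, if_true, List.length_singleton,
          List.drop_succ_cons, List.drop_zero]
        rw [ih rest [] (cur.reverse :: acc) (by simpa using Nat.le_of_succ_le_succ h)]
        simp only [pvSplit1, if_true, List.reverse_cons, List.append_assoc,
          List.tail_cons, List.headI_cons]
        cases hs : pvSplit1 rest with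
        | nil => exact absurd hs (pvSplit1_ne_nil rest)
        | cons s ss => simp
      · have hpre : List.isPrefixOf ['#'] (c :: rest) = false := by
          simp [List.isPrefixOf]
          exact fun h => absurd h.symm hc
        simp only [PySem.Chars.splitOn.go, hpre]
        rw [ih rest (c :: cur) acc (by simpa using Nat.le_of_succ_le_succ h)]
        have hne := pvSplit1_ne_nil rest
        simp only [pvSplit1, hc, if_false]
        cases hs : pvSplit1 rest with
        | nil => exact absurd hs hne
        | cons s ss => simp [hs]

theorem splitOn_eq_pvSplit1 (cs : List Char) :
    PySem.Chars.splitOn cs ['#'] = pvSplit1 cs := by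
  unfold PySem.Chars.splitOn
  rw [splitOn_go_eq (cs.length + 1) cs [] [] (by omega)]
  have hne := pvSplit1_ne_nil cs
  cases hs : pvSplit1 cs with
  | nil => exact absurd hs hne
  | cons s ss => simp [hs]

theorem count_go_eq (fuel : Nat) : ∀ (l : List Char) (acc : Nat),
    l.length ≤ fuel →
    PySem.Chars.count.go ['O'] fuel l acc = acc + l.count 'O' := by
  induction fuel with
  | zero =>
    intro l acc h
    have : l = [] := List.length_eq_zero_iff.mp (Nat.le_zero.mp h)
    subst this
    simp [PySem.Chars.count.go]
  | succ fuel ih =>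
    intro l acc h
    cases l with
    | nil => simp [PySem.Chars.count.go]
    | cons c rest =>
      by_cases hc : c = 'O'
      · subst hc
        have hpre : List.isPrefixOf ['O'] ('O' :: rest) = true := by simp [List.isPrefixOf]
        simp only [PySem.Chars.count.go, hpre, if_true, List.length_singleton,
          List.drop_succ_cons, List.drop_zero]
        rw [ih rest (acc + 1) (by simpa using Nat.le_of_succ_le_succ h)]
        simp [List.count_cons]
        omega
      · have hpre : List.isPrefixOf ['O'] (c :: rest) = false := by
          simp [List.isPrefixOf]
          exact fun h => absurd h.symm hc
        simp only [PySem.Chars.count.go, hpre]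
        rw [ih rest acc (by simpa using Nat.le_of_succ_le_succ h)]
        simp [List.count_cons, hc]

theorem count_singleton_eq (s : List Char) :
    PySem.Chars.count s ['O'] = s.count 'O' := by
  unfold PySem.Chars.count
  simp only [List.isEmpty_cons, if_false, Bool.false_eq_true]
  simpa using count_go_eq s.length s 0 (le_refl _)

theorem count_le_length (s : List Char) : s.count 'O' ≤ s.length :=
  List.count_le_length

-- B's packed segment equals the canonical pack
def pvPack (s : List Char) : List Char :=
  List.replicate (s.count 'O') 'O' ++ List.replicate (s.length - s.count 'O') '.'

theorem pack_port_eq (seg : List Char) :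
    (List.replicate (PySem.Chars.count seg ['O']) 'O' ++
      List.replicate ((PySem.List.len seg) - ((PySem.Chars.count seg ['O'] : Nat) : Int)).toNat '.') =
    pvPack seg := by
  rw [count_singleton_eq]
  simp [pvPack, PySem.List.len_eq]

-- merged view of pvGo through the split
theorem pvGo_split (cs : List Char) : ∀ (r d : Nat),
    pvGo cs r d =
      (List.replicate (r + (pvSplit1 cs).headI.count 'O') 'O' ++
        List.replicate (d + ((pvSplit1 cs).headI.length - (pvSplit1 cs).headI.count 'O')) '.') ++
      ((pvSplit1 cs).tail.flatMap (fun s => '#' :: pvPack s)) := by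
  induction cs with
  | nil => intro r d; simp [pvSplit1, pvGo]
  | cons c rest ih =>
    intro r d
    by_cases hO : c = 'O'
    · subst hO
      simp only [pvGo, if_true, pvSplit1, if_neg (by decide : ¬('O' : Char) = '#')]
      cases hp : pvSplit1 rest with
      | nil => exact absurd hp (pvSplit1_ne_nil rest)
      | cons s0 ss =>
        rw [ih (r + 1) d, hp]
        simp only [List.headI_cons, List.tail_cons]
        have hle := count_le_length s0
        rw [List.count_cons_self, List.length_cons,
          show r + 1 + s0.count 'O' = r + (s0.count 'O' + 1) by omega,
          show d + (s0.length - s0.count 'O') = d + (s0.length + 1 - (s0.count 'O' + 1)) by omega]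
    · by_cases hH : c = '#'
      · subst hH
        simp only [pvGo, if_neg (by decide : ¬('#' : Char) = 'O'), if_true, pvSplit1,
          List.headI_cons, List.tail_cons]
        rw [ih 0 0]
        cases hp : pvSplit1 rest with
        | nil => exact absurd hp (pvSplit1_ne_nil rest)
        | cons s0 ss =>
          simp [pvPack, List.flatMap_cons]
      · simp only [pvGo, hO, hH, if_false, pvSplit1]
        cases hp : pvSplit1 rest with
        | nil => exact absurd hp (pvSplit1_ne_nil rest)
        | cons s0 ss =>
          rw [ih r (d + 1), hp]
          simp only [List.headI_cons, List.tail_cons]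
          have hle := count_le_length s0
          have hcc : List.count 'O' (c :: s0) = List.count 'O' s0 := by
            simp [List.count_cons, hO]
          rw [hcc, List.length_cons,
            show d + 1 + (s0.length - s0.count 'O') = d + (s0.length + 1 - s0.count 'O') by omega]

-- join over packed segments equals the merged view
theorem join_pack (s0 : List Char) (ss : List (List Char)) :
    PySem.Chars.join ['#'] ((s0 :: ss).map pvPack) =
      pvPack s0 ++ ss.flatMap (fun s => '#' :: pvPack s) := by
  induction ss generalizing s0 with
  | nil => simp [PySem.Chars.join_singleton]
  | cons s1 rest ih =>
    rw [show (s0 :: s1 :: rest).map pvPack = pvPack s0 :: pvPack s1 :: rest.map pvPack from rfl,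
      PySem.Chars.join_cons_cons,
      show pvPack s1 :: rest.map pvPack = (s1 :: rest).map pvPack from rfl,
      ih s1, List.flatMap_cons]
    simp

-- B's per-row chars equal pvGo
theorem tiltB_eq_go (cs : List Char) :
    PySem.Chars.join ['#'] ((PySem.Chars.splitOn cs ['#']).map (fun seg =>
      List.replicate (PySem.Chars.count seg ['O']) 'O' ++
        List.replicate ((PySem.List.len seg) - ((PySem.Chars.count seg ['O'] : Nat) : Int)).toNat '.')) =
    pvGo cs 0 0 := by
  rw [splitOn_eq_pvSplit1]
  have hmap : (pvSplit1 cs).map (fun seg =>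
      List.replicate (PySem.Chars.count seg ['O']) 'O' ++
        List.replicate ((PySem.List.len seg) - ((PySem.Chars.count seg ['O'] : Nat) : Int)).toNat '.') =
      (pvSplit1 cs).map pvPack := by
    apply List.map_congr_left
    intro s _
    exact pack_port_eq s
  rw [hmap]
  cases hp : pvSplit1 cs with
  | nil => exact absurd hp (pvSplit1_ne_nil cs)
  | cons s0 ss =>
    rw [join_pack, pvGo_split cs 0 0, hp]
    simp [pvPack]

-- A's loop invariant: entering position m with last_pos = m - 1 - r - d and final length L
theorem tiltA_loop (cs : List Char) : ∀ (m : Int) (r d : Nat) (lp ri L : Int) (acc : List Char),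
    lp = m - 1 - r - d → ri = (r : Int) → L = m + cs.length →
    ((PySem.List.enumerate cs m).foldl
      (fun (st : Int × Int × List Char) pc =>
        if pc.2 = 'O' then (st.1, st.2.1 + 1, st.2.2)
        else if pc.2 = '#' then
          (pc.1, 0, st.2.2 ++ List.replicate st.2.1.toNat 'O'
            ++ List.replicate (pc.1 - 1 - st.1 - st.2.1).toNat '.' ++ ['#'])
        else st)
      (lp, ri, acc)).2.2 ++
      List.replicate ((PySem.List.enumerate cs m).foldl
      (fun (st : Int × Int × List Char) pc =>
        if pc.2 = 'O' then (st.1, st.2.1 + 1, st.2.2)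
        else if pc.2 = '#' then
          (pc.1, 0, st.2.2 ++ List.replicate st.2.1.toNat 'O'
            ++ List.replicate (pc.1 - 1 - st.1 - st.2.1).toNat '.' ++ ['#'])
        else st)
      (lp, ri, acc)).2.1.toNat 'O' ++
      List.replicate (L - 1 - ((PySem.List.enumerate cs m).foldl
      (fun (st : Int × Int × List Char) pc =>
        if pc.2 = 'O' then (st.1, st.2.1 + 1, st.2.2)
        else if pc.2 = '#' then
          (pc.1, 0, st.2.2 ++ List.replicate st.2.1.toNat 'O'
            ++ List.replicate (pc.1 - 1 - st.1 - st.2.1).toNat '.' ++ ['#'])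
        else st)
      (lp, ri, acc)).1 - ((PySem.List.enumerate cs m).foldl
      (fun (st : Int × Int × List Char) pc =>
        if pc.2 = 'O' then (st.1, st.2.1 + 1, st.2.2)
        else if pc.2 = '#' then
          (pc.1, 0, st.2.2 ++ List.replicate st.2.1.toNat 'O'
            ++ List.replicate (pc.1 - 1 - st.1 - st.2.1).toNat '.' ++ ['#'])
        else st)
      (lp, ri, acc)).2.1).toNat '.' =
    acc ++ pvGo cs r d := by
  induction cs with
  | nil =>
    intro m r d lp ri L acc hlp hri hL
    simp only [PySem.List.enumerate_nil, List.foldl_nil, List.length_nil, pvGo]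
    simp only [List.length_nil] at hL
    rw [show ri.toNat = r by omega,
      show (L - 1 - lp - ri).toNat = d by push_cast at hL; omega]
    simp
  | cons c rest ih =>
    intro m r d lp ri L acc hlp hri hL
    simp only [PySem.List.enumerate_cons, List.foldl_cons]
    simp only [List.length_cons] at hL
    by_cases hO : c = 'O'
    · subst hO
      simp only [if_true]
      rw [ih (m + 1) (r + 1) d lp (ri + 1) L acc (by push_cast; omega)
        (by push_cast; omega) (by push_cast at hL ⊢; omega)]
      simp [pvGo]
    · by_cases hH : c = '#'
      · subst hH
        simp only [if_neg (by decide : ¬('#' : Char) = 'O'), if_true]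
        rw [show ri.toNat = r by omega,
          show (m - 1 - lp - ri).toNat = d by omega]
        rw [ih (m + 1) 0 0 m 0 L _ (by push_cast; ring) (by simp)
          (by push_cast at hL ⊢; omega)]
        simp [pvGo, hO]
      · simp only [hO, hH, if_false]
        rw [ih (m + 1) r (d + 1) lp ri L acc (by push_cast; omega) hri
          (by push_cast at hL ⊢; omega)]
        simp [pvGo, hO, hH]

-- per-row equality of the two ports' inner computations
theorem row_eq (row : String) :
    ((PySem.List.enumerate row.toList 0).foldl
      (fun (st : Int × Int × List Char) pc =>
        if pc.2 = 'O' then (st.1, st.2.1 + 1, st.2.2)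
        else if pc.2 = '#' then
          (pc.1, 0, st.2.2 ++ List.replicate st.2.1.toNat 'O'
            ++ List.replicate (pc.1 - 1 - st.1 - st.2.1).toNat '.' ++ ['#'])
        else st)
      (-1, 0, ([] : List Char))).2.2 ++
      List.replicate ((PySem.List.enumerate row.toList 0).foldl
      (fun (st : Int × Int × List Char) pc =>
        if pc.2 = 'O' then (st.1, st.2.1 + 1, st.2.2)
        else if pc.2 = '#' then
          (pc.1, 0, st.2.2 ++ List.replicate st.2.1.toNat 'O'
            ++ List.replicate (pc.1 - 1 - st.1 - st.2.1).toNat '.' ++ ['#'])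
        else st)
      (-1, 0, ([] : List Char))).2.1.toNat 'O' ++
      List.replicate (PySem.Str.len row - 1 - ((PySem.List.enumerate row.toList 0).foldl
      (fun (st : Int × Int × List Char) pc =>
        if pc.2 = 'O' then (st.1, st.2.1 + 1, st.2.2)
        else if pc.2 = '#' then
          (pc.1, 0, st.2.2 ++ List.replicate st.2.1.toNat 'O'
            ++ List.replicate (pc.1 - 1 - st.1 - st.2.1).toNat '.' ++ ['#'])
        else st)
      (-1, 0, ([] : List Char))).1 - ((PySem.List.enumerate row.toList 0).foldl
      (fun (st : Int × Int × List Char) pc =>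
        if pc.2 = 'O' then (st.1, st.2.1 + 1, st.2.2)
        else if pc.2 = '#' then
          (pc.1, 0, st.2.2 ++ List.replicate st.2.1.toNat 'O'
            ++ List.replicate (pc.1 - 1 - st.1 - st.2.1).toNat '.' ++ ['#'])
        else st)
      (-1, 0, ([] : List Char))).2.1).toNat '.' =
    PySem.Chars.join ['#'] ((PySem.Chars.splitOn row.toList ['#']).map (fun seg =>
      List.replicate (PySem.Chars.count seg ['O']) 'O' ++
        List.replicate ((PySem.List.len seg) - ((PySem.Chars.count seg ['O'] : Nat) : Int)).toNat '.')) := by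
  rw [tiltB_eq_go]
  have h := tiltA_loop row.toList 0 0 0 (-1) 0 (PySem.Str.len row) []
    (by simp) (by simp) (by simp [PySem.Str.len_eq])
  simp only [List.nil_append] at h
  exact h

-- ===== VERDICT (by name: the statement is the Claim_ definition above) =====
theorem left_tilted_spec : Claim_equal_left_tilted := by
  intro grid _
  unfold Spec_left_tilted left_tilted left_tilted_alt
  rw [PySem.List.foldl_append_singleton_eq_map, PySem.List.foldl_append_singleton_eq_map]
  apply List.map_congr_left
  intro row _
  simp only
  rw [row_eq row]
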